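-- pv_equiv track=rewrite | github.com/RealColdFate/DiceBot | src/informational_commands/coin_additional_functions.py | compress_copper
-- ===== SOURCE A (Python) =====
-- def compress_copper(copper_amount: int) -> list:
--     """
--     compresses the amount of copper into the higher coin types
--     Note: copper amount must be positive or we will throw a Value Error
--     :param copper_amount: int
--     :return: list A list of ints representing the coin types
--     """
--     conversion_rate = [1, 10, 50, 100, 1000]
--     r_conversion_rate = reversed(conversion_rate)
--     amount_list = []
--     for i in r_conversion_rate:
--         coin_amount = copper_amount // i
--         amount_list.append(coin_amount)
--         copper_amount -= coin_amount * i
--     return list(reversed(amount_list))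
-- ===== SOURCE B (Python) =====
-- def compress_copper(copper_amount: int) -> list:
--     """Closed-form: each coin count computed independently via // and %."""
--     c = copper_amount
--     return [c % 10, (c % 50) // 10, (c % 100) // 50, (c % 1000) // 100, c // 1000]
-- ===== Notes on version B (the rewrite author's own statement) =====
-- stated objective: simpler
-- what changed: Replaces the remainder-threading loop (with two list reversals) by five independent closed-form floor-div/mod extractions.
import Mathlib
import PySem

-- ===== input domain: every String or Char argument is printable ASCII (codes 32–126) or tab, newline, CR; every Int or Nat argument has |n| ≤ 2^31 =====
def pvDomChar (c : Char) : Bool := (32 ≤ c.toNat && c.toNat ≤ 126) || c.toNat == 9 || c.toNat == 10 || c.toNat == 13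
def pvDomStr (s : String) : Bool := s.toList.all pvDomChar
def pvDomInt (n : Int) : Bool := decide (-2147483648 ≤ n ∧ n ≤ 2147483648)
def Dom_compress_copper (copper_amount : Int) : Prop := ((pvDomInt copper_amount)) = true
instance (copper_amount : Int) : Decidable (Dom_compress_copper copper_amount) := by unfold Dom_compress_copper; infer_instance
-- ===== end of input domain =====

-- B replaces A's remainder-threading loop (and double reversal) by five independent closed-form floor-div/mod extractions (simpler, same cost).


-- ===== PORT A =====
-- Port of A: fold over reversed conversion rates threading (amount_list, remaining copper), then reverse.
def compress_copper (copper_amount : Int) : List Int :=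
  let conversion_rate : List Int := [1, 10, 50, 100, 1000]
  let r_conversion_rate := conversion_rate.reverse
  let st := r_conversion_rate.foldl
    (fun (s : List Int × Int) i =>
      let coin_amount := PySem.Int.floordiv s.2 i
      (s.1 ++ [coin_amount], s.2 - coin_amount * i))
    ([], copper_amount)
  st.1.reverse

-- ===== PORT B =====
-- Port of B: five independent closed-form extractions.
def compress_copper_alt (copper_amount : Int) : List Int :=
  [PySem.Int.mod copper_amount 10,
   PySem.Int.floordiv (PySem.Int.mod copper_amount 50) 10,
   PySem.Int.floordiv (PySem.Int.mod copper_amount 100) 50,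
   PySem.Int.floordiv (PySem.Int.mod copper_amount 1000) 100,
   PySem.Int.floordiv copper_amount 1000]

-- ===== PRECONDITION & SPEC =====
def Spec_compress_copper (copper_amount : Int) (out : List Int) : Prop := out = compress_copper_alt copper_amount
instance (copper_amount : Int) (out : List Int) : Decidable (Spec_compress_copper copper_amount out) := by unfold Spec_compress_copper; infer_instance

-- ===== CLAIM (what is proved, stated in full; the proofs are below) =====
def Claim_equal_compress_copper : Prop := ∀ (copper_amount : Int), Dom_compress_copper copper_amount → Spec_compress_copper copper_amount (compress_copper copper_amount)

-- ===== LEMMAS AND PROOFS =====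

-- ===== VERDICT (by name: the statement is the Claim_ definition above) =====
theorem fd_pos (a b : Int) (h : 0 < b) : PySem.Int.floordiv a b = a / b :=
  PySem.Int.floordiv_eq_ediv_of_pos h

theorem md_pos (a b : Int) (h : 0 < b) : PySem.Int.mod a b = a % b :=
  PySem.Int.mod_eq_emod_of_pos h

theorem compress_copper_spec : Claim_equal_compress_copper := by
  intro c _
  unfold Spec_compress_copper compress_copper compress_copper_alt
  simp only [List.foldl, List.reverse, List.reverseAux, List.nil_append, List.cons_append]
  rw [fd_pos _ 1000 (by norm_num), fd_pos _ 100 (by norm_num), fd_pos _ 50 (by norm_num),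
    fd_pos _ 10 (by norm_num), fd_pos _ 1 (by norm_num),
    md_pos _ 10 (by norm_num), md_pos _ 50 (by norm_num), md_pos _ 100 (by norm_num),
    md_pos _ 1000 (by norm_num)]
  refine List.ext_getElem (by simp) fun i h1 h2 => ?_
  simp only [List.length_cons, List.length_nil] at h1
  interval_cases i <;> simp <;> omega
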